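-- pv_equiv track=rewrite | github.com/frenzymadness/RH-devconf2018-challenge | longer_but_fast.py | winning_die
-- ===== SOURCE A (Python) =====
-- def winning_die(enemy_die):
--     dim = len(enemy_die)
--     total = sum(enemy_die)
--     win = [0 for _ in range(total + 1)]
--     for i in range(1, total + 1):
--         for j in enemy_die:
--             win[i] += (i > j) - (j > i)
--     subanswers = [[(0, 0) for tot in range(total + 1)] for die in range(dim + 1)]
--
--     for num_die in range(0, dim):
--         for subsum in range(num_die + 1, total + 1):
--             possibilities = []
--             for last in range(1, subsum - num_die + 1):
--                 poss = (win[last] + subanswers[num_die][subsum - last][0], last)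
--                 possibilities.append(poss)
--             subanswers[num_die + 1][subsum] = max(possibilities)
--     ans = []
--     if subanswers[dim][total][0] > 0:
--         cur = total
--         for i in range(dim):
--             side = subanswers[dim - i][cur][1]
--             ans.append(side)
--             cur -= side
--     return ans
-- ===== SOURCE B (Python) =====
-- def winning_die(enemy_die):
--     dim = len(enemy_die)
--     total = sum(enemy_die)
--     win_cache = {}
--
--     def win(i):
--         if i not in win_cache:
--             win_cache[i] = sum((i > j) - (j > i) for j in enemy_die)
--         return win_cache[i]
--
--     memo = {}
--
--     def f(k, s):
--         # best (value, last_face) over ordered choices of k faces >= 1 summing to s (s >= k)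
--         if k == 0:
--             return (0, 0)
--         if (k, s) not in memo:
--             best = (win(1) + f(k - 1, s - 1)[0], 1)
--             for last in range(2, s - k + 2):
--                 cand = (win(last) + f(k - 1, s - last)[0], last)
--                 if cand > best:
--                     best = cand
--             memo[(k, s)] = best
--         return memo[(k, s)]
--
--     if total < dim or f(dim, total)[0] <= 0:
--         return []
--     ans = []
--     cur = total
--     for k in range(dim, 0, -1):
--         side = f(k, cur)[1]
--         ans.append(side)
--         cur -= side
--     return ans
-- ===== Notes on version B (the rewrite author's own statement) =====
-- stated objective: alternative
-- what changed: A fills a full bottom-up (dim+1)x(total+1) DP table and then walks it backwards; B computes the same (value, last-face) recurrence by top-down memoized recursion and reconstructs the die from the memo, with per-face win counts computed lazily and cached instead of precomputed into an array.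
import Mathlib
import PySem

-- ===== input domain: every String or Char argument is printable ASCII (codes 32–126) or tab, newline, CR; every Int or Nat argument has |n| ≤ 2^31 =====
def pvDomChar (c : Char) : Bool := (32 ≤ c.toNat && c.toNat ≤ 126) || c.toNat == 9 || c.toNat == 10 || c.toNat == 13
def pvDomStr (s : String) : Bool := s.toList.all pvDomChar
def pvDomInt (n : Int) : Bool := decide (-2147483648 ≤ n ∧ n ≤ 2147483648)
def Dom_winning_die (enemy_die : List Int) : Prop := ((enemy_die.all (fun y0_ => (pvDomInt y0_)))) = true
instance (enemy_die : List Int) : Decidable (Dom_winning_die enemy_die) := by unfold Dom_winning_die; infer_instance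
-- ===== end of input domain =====

-- B replaces A's bottom-up DP table and backward reconstruction by top-down memoized recursion
-- on the same recurrence (objective: alternative decomposition, same asymptotic cost).

-- ===== PORT A =====
-- Python max() over the nonempty 'possibilities' list of int pairs, hand-ported: Python
-- tuple order, first maximal element kept ([] would be ValueError in Python; unreachable here).
def pvAmax : List (Int × Int) → Int × Int
  | [] => (0, 0)
  | h :: t => t.foldl (fun b c => if b.1 < c.1 ∨ (b.1 = c.1 ∧ b.2 < c.2) then c else b) h

-- inner 'for j in enemy_die: win[i] += (i > j) - (j > i)'
def pvAwinInner (enemy_die : List Int) (w : List Int) (i : Int) : List Int :=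
  enemy_die.foldl (fun w j =>
    PySem.List.pySetD w i (PySem.List.pyGetD w i 0 +
      ((if i > j then 1 else 0) - (if j > i then 1 else 0)))) w

-- 'win = [0]*(total+1); for i in range(1, total+1): …'
def pvAwin (enemy_die : List Int) : List Int :=
  (PySem.List.pyRange 1 (enemy_die.sum + 1) 1).foldl (pvAwinInner enemy_die)
    ((PySem.List.pyRange 0 (enemy_die.sum + 1) 1).map (fun _ => (0 : Int)))

-- 'possibilities = []; for last in range(1, subsum - num_die + 1): possibilities.append(…)'
def pvAposs (win : List Int) (sub : List (List (Int × Int))) (num_die subsum : Int) :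
    List (Int × Int) :=
  (PySem.List.pyRange 1 (subsum - num_die + 1) 1).foldl
    (fun ps last =>
      ps ++ [(PySem.List.pyGetD win last 0 +
              (PySem.List.pyGetD (PySem.List.pyGetD sub num_die []) (subsum - last) (0, 0)).1,
             last)]) []

-- 'subanswers[num_die + 1][subsum] = max(possibilities)'
def pvAcell (win : List Int) (sub : List (List (Int × Int))) (num_die subsum : Int) :
    List (List (Int × Int)) :=
  PySem.List.pySetD sub (num_die + 1)
    (PySem.List.pySetD (PySem.List.pyGetD sub (num_die + 1) []) subsum
      (pvAmax (pvAposs win sub num_die subsum)))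

-- 'for subsum in range(num_die + 1, total + 1): …'
def pvArow (enemy_die : List Int) (win : List Int) (sub : List (List (Int × Int)))
    (num_die : Int) : List (List (Int × Int)) :=
  (PySem.List.pyRange (num_die + 1) (enemy_die.sum + 1) 1).foldl
    (fun sub subsum => pvAcell win sub num_die subsum) sub

-- 'subanswers = [[(0,0)]*(total+1)]*(dim+1); for num_die in range(0, dim): …'
def pvAsub (enemy_die : List Int) : List (List (Int × Int)) :=
  (PySem.List.pyRange 0 (enemy_die.length : Int) 1).foldl
    (pvArow enemy_die (pvAwin enemy_die))
    ((PySem.List.pyRange 0 ((enemy_die.length : Int) + 1) 1).map (fun _ =>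
      (PySem.List.pyRange 0 (enemy_die.sum + 1) 1).map (fun _ => ((0 : Int), (0 : Int)))))

-- 'side = subanswers[dim - i][cur][1]; ans.append(side); cur -= side'
def pvAreco (enemy_die : List Int) (sub : List (List (Int × Int)))
    (st : List Int × Int) (i : Int) : List Int × Int :=
  let side := (PySem.List.pyGetD (PySem.List.pyGetD sub ((enemy_die.length : Int) - i) []) st.2
      (0, 0)).2
  (st.1 ++ [side], st.2 - side)

def winning_die (enemy_die : List Int) : List Int :=
  let dim : Int := (enemy_die.length : Int)
  let total : Int := enemy_die.sum
  let sub := pvAsub enemy_die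
  if (PySem.List.pyGetD (PySem.List.pyGetD sub dim []) total (0, 0)).1 > 0 then
    ((PySem.List.pyRange 0 dim 1).foldl (pvAreco enemy_die sub) ([], total)).1
  else []

-- ===== PORT B =====
-- B's win(i); the win_cache dict of Source B is a pure cache (identical values), elided here.
def pvBwin (enemy_die : List Int) (i : Int) : Int :=
  enemy_die.foldl (fun a j =>
    a + ((if i > j then 1 else 0) - (if j > i then 1 else 0))) 0

-- B's memoized f(k, s): the memo dict is threaded through explicitly.
def pvFmemo (enemy_die : List Int) :
    Nat → Int → PySem.Dict (Int × Int) (Int × Int) →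
      (Int × Int) × PySem.Dict (Int × Int) (Int × Int)
  | 0, _, memo => ((0, 0), memo)
  | k + 1, s, memo =>
    match PySem.Dict.get? memo ((k : Int) + 1, s) with
    | some v => (v, memo)
    | none =>
      let r := pvFmemo enemy_die k (s - 1) memo
      let res := (PySem.List.pyRange 2 (s - k + 1) 1).foldl
        (fun (bm : (Int × Int) × PySem.Dict (Int × Int) (Int × Int)) last =>
          let q := pvFmemo enemy_die k (s - last) bm.2
          let cand := (pvBwin enemy_die last + q.1.1, last)
          (if bm.1.1 < cand.1 ∨ (bm.1.1 = cand.1 ∧ bm.1.2 < cand.2) then cand else bm.1, q.2))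
        ((pvBwin enemy_die 1 + r.1.1, 1), r.2)
      (res.1, PySem.Dict.insert res.2 ((k : Int) + 1, s) res.1)

-- B's reconstruction loop 'for k in range(dim, 0, -1): …' (memo carried along)
def pvWalkM (enemy_die : List Int) :
    Nat → Int → PySem.Dict (Int × Int) (Int × Int) → List Int
  | 0, _, _ => []
  | k + 1, cur, memo =>
    let r := pvFmemo enemy_die (k + 1) cur memo
    r.1.2 :: pvWalkM enemy_die k (cur - r.1.2) r.2

def winning_die_alt (enemy_die : List Int) : List Int :=
  let dim := enemy_die.length
  let total := enemy_die.sum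
  if total < (dim : Int) then []
  else
    let r := pvFmemo enemy_die dim total PySem.Dict.empty
    if r.1.1 ≤ 0 then [] else pvWalkM enemy_die dim total r.2

-- ===== PRECONDITION & SPEC =====
-- Pre_ excludes inputs with a negative total (sum of faces), on which A raises IndexError
-- (its DP table has empty rows); B naturally returns the empty list there.
def Pre_winning_die (enemy_die : List Int) : Prop := 0 ≤ enemy_die.sum
instance (enemy_die : List Int) : Decidable (Pre_winning_die enemy_die) := by
  unfold Pre_winning_die; infer_instance

def pvWitness_winning_die : List Int := [1]

def Spec_winning_die (enemy_die : List Int) (out : List Int) : Prop :=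
  out = winning_die_alt enemy_die
instance (enemy_die : List Int) (out : List Int) : Decidable (Spec_winning_die enemy_die out) := by
  unfold Spec_winning_die; infer_instance

-- ===== CLAIM (what is proved, stated in full; the proofs are below) =====
def Claim_equal_winning_die : Prop := ∀ (enemy_die : List Int), Dom_winning_die enemy_die →
  Pre_winning_die enemy_die → Spec_winning_die enemy_die (winning_die enemy_die)

-- ===== LEMMAS AND PROOFS =====


-- proof-side pure versions of B's f and of the reconstruction walk
def pvF (enemy_die : List Int) : Nat → Int → Int × Int
  | 0, _ => (0, 0)
  | k + 1, s =>
    (PySem.List.pyRange 2 (s - k + 1) 1).foldl (fun best last =>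
        let cand := (pvBwin enemy_die last + (pvF enemy_die k (s - last)).1, last)
        if best.1 < cand.1 ∨ (best.1 = cand.1 ∧ best.2 < cand.2) then cand else best)
      (pvBwin enemy_die 1 + (pvF enemy_die k (s - 1)).1, 1)

def pvWalk (enemy_die : List Int) : Nat → Int → List Int
  | 0, _ => []
  | k + 1, cur =>
    let side := (pvF enemy_die (k + 1) cur).2
    side :: pvWalk enemy_die k (cur - side)

-- every memo entry is a correct value of the pure recurrence
def pvGood (e : List Int) (memo : PySem.Dict (Int × Int) (Int × Int)) : Prop :=
  ∀ p v, PySem.Dict.get? memo p = some v → v = pvF e p.1.toNat p.2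

theorem pvFmemo_spec (e : List Int) :
    ∀ (k : Nat) (s : Int) (memo : PySem.Dict (Int × Int) (Int × Int)), pvGood e memo →
      (pvFmemo e k s memo).1 = pvF e k s ∧ pvGood e (pvFmemo e k s memo).2 := by
  intro k
  induction k with
  | zero => intro s memo hg; exact ⟨rfl, hg⟩
  | succ k ih =>
    intro s memo hg
    rw [show pvF e (k + 1) s
          = (PySem.List.pyRange 2 (s - k + 1) 1).foldl (fun best last =>
              let cand := (pvBwin e last + (pvF e k (s - last)).1, last)
              if best.1 < cand.1 ∨ (best.1 = cand.1 ∧ best.2 < cand.2) then cand else best)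
            (pvBwin e 1 + (pvF e k (s - 1)).1, 1) from rfl]
    simp only [pvFmemo]
    cases hm : PySem.Dict.get? memo ((k : Int) + 1, s) with
    | some v =>
      have hv := hg _ _ hm
      rw [show (((k : Int) + 1, s) : Int × Int).1.toNat = k + 1 from by omega] at hv
      exact ⟨hv, hg⟩
    | none =>
      obtain ⟨h1, hgood1⟩ := ih (s - 1) memo hg
      have hfold : ∀ (l : List Int) (b : Int × Int)
          (mm : PySem.Dict (Int × Int) (Int × Int)), pvGood e mm →
          (l.foldl (fun (bm : (Int × Int) × PySem.Dict (Int × Int) (Int × Int)) last =>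
              let q := pvFmemo e k (s - last) bm.2
              let cand := (pvBwin e last + q.1.1, last)
              (if bm.1.1 < cand.1 ∨ (bm.1.1 = cand.1 ∧ bm.1.2 < cand.2) then cand else bm.1,
                q.2)) (b, mm)).1
            = l.foldl (fun best last =>
                let cand := (pvBwin e last + (pvF e k (s - last)).1, last)
                if best.1 < cand.1 ∨ (best.1 = cand.1 ∧ best.2 < cand.2) then cand else best) b ∧
          pvGood e (l.foldl (fun (bm : (Int × Int) × PySem.Dict (Int × Int) (Int × Int)) last =>
              let q := pvFmemo e k (s - last) bm.2
              let cand := (pvBwin e last + q.1.1, last)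
              (if bm.1.1 < cand.1 ∨ (bm.1.1 = cand.1 ∧ bm.1.2 < cand.2) then cand else bm.1,
                q.2)) (b, mm)).2 := by
        intro l
        induction l with
        | nil => intro b mm hmm; exact ⟨rfl, hmm⟩
        | cons a l' ihl =>
          intro b mm hmm
          obtain ⟨hq, hqgood⟩ := ih (s - a) mm hmm
          rw [List.foldl_cons, List.foldl_cons]
          dsimp only
          rw [hq]
          exact ihl _ _ hqgood
      obtain ⟨hf1, hf2⟩ := hfold (PySem.List.pyRange 2 (s - k + 1) 1)
        (pvBwin e 1 + (pvFmemo e k (s - 1) memo).1.1, 1) (pvFmemo e k (s - 1) memo).2 hgood1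
      dsimp only
      constructor
      · rw [hf1, h1]
      · intro p v hp
        by_cases hpk : p = ((k : Int) + 1, s)
        · rw [hpk, PySem.Dict.get?_insert_self] at hp
          cases hp
          rw [hf1, h1, hpk]
          show pvF e (k + 1) s = pvF e ((k : Int) + 1).toNat s
          rw [show ((k : Int) + 1).toNat = k + 1 from by omega]
        · rw [PySem.Dict.get?_insert_of_ne _ _ hpk] at hp
          exact hf2 p v hp

theorem pvWalkM_spec (e : List Int) :
    ∀ (k : Nat) (cur : Int) (memo : PySem.Dict (Int × Int) (Int × Int)), pvGood e memo →
      pvWalkM e k cur memo = pvWalk e k cur := by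
  intro k
  induction k with
  | zero => intro cur memo _; rfl
  | succ k ih =>
    intro cur memo hg
    obtain ⟨h1, h2⟩ := pvFmemo_spec e (k + 1) cur memo hg
    show (pvFmemo e (k + 1) cur memo).1.2
        :: pvWalkM e k (cur - (pvFmemo e (k + 1) cur memo).1.2) (pvFmemo e (k + 1) cur memo).2
      = (pvF e (k + 1) cur).2 :: pvWalk e k (cur - (pvF e (k + 1) cur).2)
    rw [h1, ih _ _ h2]

-- winning_die_alt in terms of the pure recurrence
theorem pvAltChar (e : List Int) :
    winning_die_alt e
      = if e.sum < (e.length : Int) ∨ (pvF e e.length e.sum).1 ≤ 0 then []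
        else pvWalk e e.length e.sum := by
  unfold winning_die_alt
  dsimp only
  by_cases h1 : e.sum < (e.length : Int)
  · rw [if_pos h1, if_pos (Or.inl h1)]
  · rw [if_neg h1]
    have hg0 : pvGood e PySem.Dict.empty := by
      intro p v hp
      simp [PySem.Dict.empty, PySem.Dict.get?] at hp
    obtain ⟨hv, hgood⟩ := pvFmemo_spec e e.length e.sum PySem.Dict.empty hg0
    by_cases h2 : (pvF e e.length e.sum).1 ≤ 0
    · rw [if_pos (show (pvFmemo e e.length e.sum PySem.Dict.empty).1.1 ≤ 0 from by
          rw [hv]; exact h2),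
        if_pos (Or.inr h2)]
    · rw [if_neg (show ¬(pvFmemo e e.length e.sum PySem.Dict.empty).1.1 ≤ 0 from by
          rw [hv]; exact h2),
        if_neg (not_or.2 ⟨h1, h2⟩),
        pvWalkM_spec e e.length e.sum _ hgood]

-- generic foldl invariant preservation
theorem pv_foldl_inv {α β : Type} (P : β → Prop) (f : β → α → β) :
    ∀ (l : List α) (init : β), P init → (∀ b a, a ∈ l → P b → P (f b a)) →
      P (l.foldl f init) := by
  intro l
  induction l with
  | nil => intro init h _; exact h
  | cons x xs ih =>
    intro init h hs
    exact ih _ (hs init x (by simp) h) (fun b a ha hb => hs b a (by simp [ha]) hb)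

def pvTV (enemy_die : List Int) (m r s : Int) : Int × Int :=
  if 1 ≤ r ∧ r ≤ m ∧ r ≤ s then pvF enemy_die r.toNat s else (0, 0)

def pvLook (t : List (List (Int × Int))) (r s : Int) : Int × Int :=
  PySem.List.pyGetD (PySem.List.pyGetD t r []) s (0, 0)

def pvLens (enemy_die : List Int) (t : List (List (Int × Int))) : Prop :=
  t.length = ((enemy_die.length : Int) + 1).toNat ∧
  (∀ r : Int, 0 ≤ r → r ≤ (enemy_die.length : Int) →
    (PySem.List.pyGetD t r []).length = (enemy_die.sum + 1).toNat)

def pvInv (enemy_die : List Int) (m : Int) (t : List (List (Int × Int))) : Prop :=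
  pvLens enemy_die t ∧
  ∀ r s : Int, 0 ≤ r → r ≤ (enemy_die.length : Int) → 0 ≤ s → s ≤ enemy_die.sum →
    pvLook t r s = pvTV enemy_die m r s

def pvInvJ (enemy_die : List Int) (m u : Int) (t : List (List (Int × Int))) : Prop :=
  pvLens enemy_die t ∧
  ∀ r s : Int, 0 ≤ r → r ≤ (enemy_die.length : Int) → 0 ≤ s → s ≤ enemy_die.sum →
    pvLook t r s =
      if r = m + 1 ∧ m + 1 ≤ s ∧ s < u then pvF enemy_die (m + 1).toNat s
      else pvTV enemy_die m r s

theorem pv_getD_nonneg {α : Type} (xs : List α) (i : Int) (d : α) (h : 0 ≤ i) :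
    PySem.List.pyGetD xs i d = xs.getD i.toNat d := by
  unfold PySem.List.pyGetD PySem.List.pyGet? PySem.List.pyIdx?
  rw [if_pos h]
  by_cases h2 : i < (xs.length : Int)
  · rw [if_pos h2]; simp [List.getD]
  · rw [if_neg h2]
    simp only [Option.bind_none, Option.getD_none]
    rw [List.getD_eq_default]
    omega

theorem pv_getD_set {α : Type} (xs : List α) (i m : Int) (v d : α)
    (h0 : 0 ≤ i) (h1 : i < (xs.length : Int)) (hm : 0 ≤ m) :
    PySem.List.pyGetD (PySem.List.pySetD xs i v) m d =
      if m = i then v else PySem.List.pyGetD xs m d := by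
  rw [PySem.List.pySetD_of_nonneg xs v h0, pv_getD_nonneg _ _ _ hm, pv_getD_nonneg _ _ _ hm]
  by_cases he : m = i
  · subst he
    rw [if_pos rfl, List.getD_eq_getElem?_getD, List.getElem?_set_self (by omega)]
    simp
  · rw [if_neg he, List.getD_eq_getElem?_getD, List.getD_eq_getElem?_getD,
      List.getElem?_set_ne (by omega)]

theorem pv_len_set {α : Type} (xs : List α) (i : Int) (v : α) :
    (PySem.List.pySetD xs i v).length = xs.length := by
  exact PySem.List.length_pySetD xs i v

theorem pv_getD_of_all {α : Type} (xs : List α) (i : Int) (d : α) (h : ∀ x ∈ xs, x = d) :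
    PySem.List.pyGetD xs i d = d := by
  unfold PySem.List.pyGetD
  cases hg : PySem.List.pyGet? xs i with
  | none => simp
  | some x => simp only [Option.getD_some]; exact h x (PySem.List.mem_of_pyGet?_eq_some xs hg)

theorem pv_pvBwin_eq (enemy_die : List Int) (i : Int) :
    pvBwin enemy_die i =
      (enemy_die.map (fun j => ((if i > j then 1 else 0) - (if j > i then 1 else 0) : Int))).sum := by
  unfold pvBwin
  rw [PySem.List.foldl_add]
  simp

theorem pv_innerW (enemy_die : List Int) (i : Int) :
    ∀ (w : List Int), 0 ≤ i → i < (w.length : Int) →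
      pvAwinInner enemy_die w i =
        PySem.List.pySetD w i (PySem.List.pyGetD w i 0 + pvBwin enemy_die i) := by
  induction enemy_die with
  | nil =>
    intro w h0 h1
    show w = _
    rw [pv_pvBwin_eq]
    simp only [List.map_nil, List.sum_nil, add_zero]
    rw [PySem.List.pySetD_of_nonneg w _ h0, pv_getD_nonneg _ _ _ h0,
      List.getD_eq_getElem?_getD, List.getElem?_eq_getElem (by omega), Option.getD_some,
      List.set_getElem_self]
  | cons j rest ih =>
    intro w h0 h1
    show pvAwinInner rest (PySem.List.pySetD w i (PySem.List.pyGetD w i 0 + _)) i = _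
    rw [ih _ h0 (by rw [pv_len_set]; omega)]
    rw [pv_getD_set _ _ _ _ _ h0 h1 h0, if_pos rfl]
    rw [PySem.List.pySetD_of_nonneg _ _ h0, PySem.List.pySetD_of_nonneg _ _ h0,
      PySem.List.pySetD_of_nonneg _ _ h0, List.set_set]
    rw [pv_pvBwin_eq, pv_pvBwin_eq]
    simp only [List.map_cons, List.sum_cons]
    ring_nf

theorem pv_winfold (e : List Int) (ht : 0 ≤ e.sum) :
    ∀ (c : Nat) (w : List Int), (c : Int) ≤ e.sum →
    w.length = (e.sum + 1).toNat →
    (∀ i : Int, 1 ≤ i → i < e.sum + 1 - c → PySem.List.pyGetD w i 0 = pvBwin e i) →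
    (∀ i : Int, e.sum + 1 - c ≤ i → i ≤ e.sum → PySem.List.pyGetD w i 0 = 0) →
    ((PySem.List.pyRange (e.sum + 1 - c) (e.sum + 1) 1).foldl (pvAwinInner e) w).length
        = (e.sum + 1).toNat ∧
    (∀ i : Int, 1 ≤ i → i ≤ e.sum →
      PySem.List.pyGetD ((PySem.List.pyRange (e.sum + 1 - c) (e.sum + 1) 1).foldl
        (pvAwinInner e) w) i 0 = pvBwin e i) := by
  intro c
  induction c with
  | zero =>
    intro w _ hlen hdone _
    rw [PySem.List.pyRange_one_eq_nil (by omega)]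
    exact ⟨hlen, fun i h1 h2 => hdone i h1 (by push_cast; omega)⟩
  | succ c ih =>
    intro w hc hlen hdone hzero
    set m : Int := e.sum + 1 - (c + 1 : Nat) with hm
    have hm1 : 1 ≤ m := by omega
    have hmlt : m < e.sum + 1 := by omega
    rw [PySem.List.pyRange_one_cons hmlt, List.foldl_cons]
    have hmr : m + 1 = e.sum + 1 - (c : Nat) := by omega
    rw [hmr]
    have hwlen : (w.length : Int) = e.sum + 1 := by omega
    have hstep := pv_innerW e m w (by omega) (by omega)
    rw [hstep]
    apply ih
    · omega
    · rw [pv_len_set]; exact hlen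
    · intro i h1 h2
      rw [pv_getD_set _ _ _ _ _ (by omega) (by omega) (by omega)]
      by_cases hi : i = m
      · rw [if_pos hi, hzero m (by omega) (by omega), hi, zero_add]
      · rw [if_neg hi]
        exact hdone i h1 (by omega)
    · intro i h1 h2
      rw [pv_getD_set _ _ _ _ _ (by omega) (by omega) (by omega)]
      rw [if_neg (by omega)]
      exact hzero i (by omega) h2

theorem pv_win_spec (e : List Int) (ht : 0 ≤ e.sum) :
    (pvAwin e).length = (e.sum + 1).toNat ∧
    ∀ i : Int, 1 ≤ i → i ≤ e.sum →
      PySem.List.pyGetD (pvAwin e) i 0 = pvBwin e i := by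
  unfold pvAwin
  have hres := pv_winfold e ht e.sum.toNat
    ((PySem.List.pyRange 0 (e.sum + 1) 1).map (fun _ => (0 : Int)))
    (by omega)
    (by rw [List.length_map, PySem.List.length_pyRange_one]; simp)
    (by intro i hi1 hi2; omega)
    (by
      intro i _ _
      apply pv_getD_of_all
      intro x hx
      simp only [List.mem_map] at hx
      obtain ⟨_, _, hx⟩ := hx
      omega)
  have h1 : e.sum + 1 - (e.sum.toNat : Int) = 1 := by omega
  rw [h1] at hres
  exact hres

theorem pv_inv_init (e : List Int) :
    pvInv e 0
      ((PySem.List.pyRange 0 ((e.length : Int) + 1) 1).map (fun _ =>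
        (PySem.List.pyRange 0 (e.sum + 1) 1).map (fun _ => ((0 : Int), (0 : Int))))) := by
  refine ⟨⟨?_, ?_⟩, ?_⟩
  · rw [List.length_map, PySem.List.length_pyRange_one]
    try omega
  · intro r h0 h1
    rw [PySem.List.pyGetD_map_pyRange_of_nonneg _ _ _ _ h0 (by omega)]
    rw [List.length_map, PySem.List.length_pyRange_one]
    try omega
  · intro r s h0 h1 h2 h3
    unfold pvLook
    rw [PySem.List.pyGetD_map_pyRange_of_nonneg _ _ _ _ h0 (by omega)]
    rw [pv_getD_of_all]
    · unfold pvTV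
      rw [if_neg (by rintro ⟨a, b, _⟩; omega)]
    · intro x hx
      simp only [List.mem_map] at hx
      obtain ⟨_, _, hx⟩ := hx
      exact hx.symm

theorem pv_poss_max (e : List Int) (ht : 0 ≤ e.sum)
    (m s0 : Int) (t : List (List (Int × Int)))
    (hm0 : 0 ≤ m) (hs1 : m + 1 ≤ s0) (hs2 : s0 ≤ e.sum)
    (hmd : m < (e.length : Int))
    (hJ : pvInvJ e m s0 t) :
    pvAmax (pvAposs (pvAwin e) t m s0) = pvF e (m.toNat + 1) s0 := by
  obtain ⟨⟨hlen, hrow⟩, hent⟩ := hJ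
  unfold pvAposs
  rw [PySem.List.foldl_append_singleton_eq_map]
  rw [List.map_congr_left (g := fun last =>
      (pvBwin e last + (pvF e m.toNat (s0 - last)).1, last)) ?hcong]
  case hcong =>
    intro last hl
    rw [PySem.List.mem_pyRange_one] at hl
    have hw := (pv_win_spec e ht).2 last (by omega) (by omega)
    have hlook := hent m (s0 - last) (by omega) (by omega) (by omega) (by omega)
    unfold pvLook at hlook
    rw [if_neg (by rintro ⟨a, _⟩; omega)] at hlook
    unfold pvTV at hlook
    rw [hw, hlook]
    by_cases h1m : 1 ≤ m
    · rw [if_pos ⟨h1m, le_refl m, by omega⟩]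
    · rw [if_neg (by rintro ⟨a, _⟩; omega)]
      have hm0' : m.toNat = 0 := by omega
      rw [hm0']
      rfl
  rw [show PySem.List.pyRange 1 (s0 - m + 1) 1
        = 1 :: PySem.List.pyRange 2 (s0 - m + 1) 1 from by
      rw [PySem.List.pyRange_one_cons (by omega)]; norm_num]
  rw [List.map_cons]
  show (List.map _ (PySem.List.pyRange 2 (s0 - m + 1) 1)).foldl _ _ = _
  rw [List.foldl_map]
  have hcast : (m.toNat : Int) = m := by omega
  simp only [pvF, hcast]

theorem pv_cell (e : List Int) (ht : 0 ≤ e.sum)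
    (m s0 : Int) (t : List (List (Int × Int)))
    (hm0 : 0 ≤ m) (hs1 : m + 1 ≤ s0) (hs2 : s0 ≤ e.sum)
    (hmd : m < (e.length : Int))
    (hJ : pvInvJ e m s0 t) :
    pvInvJ e m (s0 + 1) (pvAcell (pvAwin e) t m s0) := by
  have hmax := pv_poss_max e ht m s0 t hm0 hs1 hs2 hmd hJ
  obtain ⟨⟨hlen, hrow⟩, hent⟩ := hJ
  have htlen : (t.length : Int) = (e.length : Int) + 1 := by omega
  have hrl : ((PySem.List.pyGetD t (m + 1) []).length : Int) = e.sum + 1 := by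
    have := hrow (m + 1) (by omega) (by omega); omega
  unfold pvAcell
  refine ⟨⟨?_, ?_⟩, ?_⟩
  · rw [pv_len_set]; exact hlen
  · intro r h0 h1
    rw [pv_getD_set _ _ _ _ _ (by omega) (by omega) h0]
    by_cases hr : r = m + 1
    · rw [if_pos hr, pv_len_set]
      have := hrow (m + 1) (by omega) (by omega); omega
    · rw [if_neg hr]; exact hrow r h0 h1
  · intro r s h0 h1 h2 h3
    have hold := hent r s h0 h1 h2 h3
    unfold pvLook at hold ⊢
    rw [pv_getD_set _ _ _ _ _ (by omega) (by omega) h0]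
    by_cases hr : r = m + 1
    · rw [if_pos hr]
      rw [pv_getD_set _ _ _ _ _ (by omega) (by omega) h2]
      rw [hr] at hold
      rw [hr]
      by_cases hs : s = s0
      · rw [if_pos hs, hmax, hs, if_pos ⟨rfl, by omega, by omega⟩]
        congr 1
        omega
      · rw [if_neg hs, hold]
        by_cases hc : m + 1 = m + 1 ∧ m + 1 ≤ s ∧ s < s0
        · rw [if_pos hc, if_pos ⟨rfl, hc.2.1, by omega⟩]
        · rw [if_neg hc, if_neg (by rintro ⟨a, b, c2⟩; exact hc ⟨rfl, b, by omega⟩)]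
    · rw [if_neg hr, hold]
      rw [if_neg (by rintro ⟨a, _⟩; exact hr a),
        if_neg (by rintro ⟨a, _⟩; exact hr a)]

theorem pv_I_to_J (e : List Int) (m : Int) (t : List (List (Int × Int)))
    (hI : pvInv e m t) : pvInvJ e m (m + 1) t := by
  obtain ⟨hl, hent⟩ := hI
  refine ⟨hl, fun r s h0 h1 h2 h3 => ?_⟩
  rw [hent r s h0 h1 h2 h3, if_neg (by rintro ⟨_, a, b⟩; omega)]

theorem pv_J_to_I (e : List Int) (m : Int) (t : List (List (Int × Int))) (hm : 0 ≤ m)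
    (hJ : pvInvJ e m (e.sum + 1) t) : pvInv e (m + 1) t := by
  obtain ⟨hl, hent⟩ := hJ
  refine ⟨hl, fun r s h0 h1 h2 h3 => ?_⟩
  rw [hent r s h0 h1 h2 h3]
  unfold pvTV
  by_cases hr : r = m + 1
  · subst hr
    by_cases hs : m + 1 ≤ s
    · rw [if_pos ⟨rfl, hs, by omega⟩, if_pos ⟨by omega, le_refl _, hs⟩]
    · rw [if_neg (by rintro ⟨_, a, _⟩; omega), if_neg (by rintro ⟨_, a, _⟩; omega),
        if_neg (by rintro ⟨_, _, a⟩; omega)]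
  · rw [if_neg (by rintro ⟨a, _⟩; exact hr a)]
    by_cases hc : 1 ≤ r ∧ r ≤ m ∧ r ≤ s
    · rw [if_pos hc, if_pos ⟨hc.1, by omega, hc.2.2⟩]
    · rw [if_neg hc, if_neg (by rintro ⟨a, b, c⟩; exact hc ⟨a, by omega, c⟩)]

theorem pv_rowfold (e : List Int) (ht : 0 ≤ e.sum) (m : Int)
    (hm0 : 0 ≤ m) (hmd : m < (e.length : Int)) :
    ∀ (c : Nat) (t : List (List (Int × Int))), (c : Int) ≤ e.sum - m →
      pvInvJ e m (e.sum + 1 - c) t →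
      pvInvJ e m (e.sum + 1)
        ((PySem.List.pyRange (e.sum + 1 - c) (e.sum + 1) 1).foldl
          (fun sub subsum => pvAcell (pvAwin e) sub m subsum) t) := by
  intro c
  induction c with
  | zero =>
    intro t _ hJ
    rw [PySem.List.pyRange_one_eq_nil (by omega)]
    simpa using hJ
  | succ c ih =>
    intro t hc hJ
    rw [PySem.List.pyRange_one_cons (by push_cast; omega), List.foldl_cons]
    have hr : e.sum + 1 - ((c : Nat) + 1 : Nat) + 1 = e.sum + 1 - (c : Nat) := by
      push_cast; ring
    rw [hr]
    apply ih _ (by omega)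
    have hstep := pv_cell e ht m (e.sum + 1 - ((c : Nat) + 1 : Nat)) t hm0
      (by push_cast; omega) (by push_cast; omega) hmd hJ
    rw [hr] at hstep
    exact hstep

theorem pv_row (e : List Int) (ht : 0 ≤ e.sum)
    (m : Int) (t : List (List (Int × Int)))
    (hm0 : 0 ≤ m) (hmd : m < (e.length : Int))
    (hI : pvInv e m t) :
    pvInv e (m + 1) (pvArow e (pvAwin e) t m) := by
  unfold pvArow
  by_cases hms : m + 1 ≤ e.sum
  · have hc : (((e.sum - m).toNat : Int)) = e.sum - m := by omega
    have hstart : e.sum + 1 - ((e.sum - m).toNat : Int) = m + 1 := by omega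
    have := pv_rowfold e ht m hm0 hmd (e.sum - m).toNat t (by omega)
      (by rw [hstart]; exact pv_I_to_J e m t hI)
    rw [hstart] at this
    exact pv_J_to_I e m _ hm0 this
  · rw [PySem.List.pyRange_one_eq_nil (by omega), List.foldl_nil]
    obtain ⟨hl, hent⟩ := hI
    refine ⟨hl, fun r s h0 h1 h2 h3 => ?_⟩
    rw [hent r s h0 h1 h2 h3]
    unfold pvTV
    by_cases hc : 1 ≤ r ∧ r ≤ m ∧ r ≤ s
    · rw [if_pos hc, if_pos ⟨hc.1, by omega, hc.2.2⟩]
    · rw [if_neg hc, if_neg (by rintro ⟨a, b, c⟩; exact hc ⟨a, by omega, c⟩)]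

theorem pv_outerfold (e : List Int) (ht : 0 ≤ e.sum) :
    ∀ (c : Nat) (t : List (List (Int × Int))), (c : Int) ≤ (e.length : Int) →
      pvInv e ((e.length : Int) - c) t →
      pvInv e (e.length : Int)
        ((PySem.List.pyRange ((e.length : Int) - c) (e.length : Int) 1).foldl
          (pvArow e (pvAwin e)) t) := by
  intro c
  induction c with
  | zero =>
    intro t _ hI
    rw [PySem.List.pyRange_one_eq_nil (by omega)]
    simpa using hI
  | succ c ih =>
    intro t hc hI
    rw [PySem.List.pyRange_one_cons (by push_cast; omega), List.foldl_cons]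
    have hr : (e.length : Int) - ((c : Nat) + 1 : Nat) + 1 = (e.length : Int) - (c : Nat) := by
      push_cast; ring
    rw [hr]
    apply ih _ (by omega)
    have hstep := pv_row e ht ((e.length : Int) - ((c : Nat) + 1 : Nat)) t
      (by push_cast; omega) (by push_cast; omega) hI
    rw [hr] at hstep
    exact hstep

theorem pv_outer (e : List Int) (ht : 0 ≤ e.sum) :
    pvInv e (e.length : Int) (pvAsub e) := by
  unfold pvAsub
  have hstart : (e.length : Int) - (e.length : Int) = 0 := by ring
  have := pv_outerfold e ht e.length _ (by omega)
    (by rw [hstart]; exact pv_inv_init e)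
  rw [hstart] at this
  exact this

-- bounds on the face chosen by pvF
theorem pv_pvF_snd (e : List Int) :
    ∀ (k : Nat) (s : Int), ((k : Int) + 1) ≤ s →
      1 ≤ (pvF e (k + 1) s).2 ∧ (pvF e (k + 1) s).2 ≤ s - k := by
  intro k s hk
  have h := pv_foldl_inv (fun b : Int × Int => 1 ≤ b.2 ∧ b.2 ≤ s - k)
    (fun best last =>
      let cand := (pvBwin e last + (pvF e k (s - last)).1, last)
      if best.1 < cand.1 ∨ (best.1 = cand.1 ∧ best.2 < cand.2) then cand else best)
    (PySem.List.pyRange 2 (s - k + 1) 1)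
    (pvBwin e 1 + (pvF e k (s - 1)).1, 1)
    ⟨le_refl 1, by omega⟩
    (by
      intro b a ha hb
      rw [PySem.List.mem_pyRange_one] at ha
      dsimp only
      split_ifs
      · exact ⟨by omega, by omega⟩
      · exact hb)
  exact h

-- A's reconstruction loop equals B's pvWalk
theorem pv_walk (e : List Int) (_ht : 0 ≤ e.sum)
    (hI : pvInv e (e.length : Int) (pvAsub e)) :
    ∀ (k : Nat) (cur : Int) (acc : List Int),
      (k : Int) ≤ (e.length : Int) → (k : Int) ≤ cur → cur ≤ e.sum →
      ((PySem.List.pyRange ((e.length : Int) - k) (e.length : Int) 1).foldl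
          (pvAreco e (pvAsub e)) (acc, cur)).1 =
        acc ++ pvWalk e k cur := by
  intro k
  induction k with
  | zero =>
    intro cur acc _ _ _
    rw [Nat.cast_zero, sub_zero, PySem.List.pyRange_one_eq_nil (le_refl _), List.foldl_nil]
    show acc = acc ++ pvWalk e 0 cur
    rw [show pvWalk e 0 cur = [] from rfl, List.append_nil]
  | succ k ih =>
    intro cur acc h1 h2 h3
    rw [PySem.List.pyRange_one_cons (by push_cast; omega), List.foldl_cons]
    have hlook := hI.2 ((k + 1 : Nat) : Int) cur (by push_cast; omega) h1
      (by push_cast at h2 ⊢; omega) h3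
    unfold pvLook at hlook
    unfold pvTV at hlook
    rw [if_pos (show 1 ≤ ((k + 1 : Nat) : Int) ∧ ((k + 1 : Nat) : Int) ≤ (e.length : Int) ∧
          ((k + 1 : Nat) : Int) ≤ cur from ⟨by push_cast; omega, h1, h2⟩),
      Int.toNat_natCast] at hlook
    have hside := pv_pvF_snd e k cur (by push_cast at h2 ⊢; omega)
    have hstep : pvAreco e (pvAsub e) (acc, cur) ((e.length : Int) - ((k + 1 : Nat) : Int)) =
        (acc ++ [(pvF e (k + 1) cur).2], cur - (pvF e (k + 1) cur).2) := by
      unfold pvAreco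
      dsimp only
      rw [show (e.length : Int) - ((e.length : Int) - ((k + 1 : Nat) : Int))
            = ((k + 1 : Nat) : Int) from by ring]
      rw [hlook]
    rw [hstep]
    rw [show (e.length : Int) - ((k + 1 : Nat) : Int) + 1 = (e.length : Int) - (k : Nat) from by
      push_cast; ring]
    rw [ih (cur - (pvF e (k + 1) cur).2) (acc ++ [(pvF e (k + 1) cur).2])
      (by push_cast at h1 ⊢; omega) (by push_cast at h2 ⊢; omega) (by omega)]
    rw [show pvWalk e (k + 1) cur
          = (pvF e (k + 1) cur).2 :: pvWalk e k (cur - (pvF e (k + 1) cur).2) from rfl]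
    rw [List.append_assoc, List.singleton_append]

-- the two ports agree on Pre_
theorem pv_main (e : List Int) (ht : 0 ≤ e.sum) : winning_die e = winning_die_alt e := by
  rw [pvAltChar]
  unfold winning_die
  dsimp only
  have hI := pv_outer e ht
  have hlook := hI.2 (e.length : Int) e.sum (by omega) (le_refl _) ht (le_refl _)
  unfold pvLook at hlook
  rw [hlook]
  unfold pvTV
  by_cases hdim : 1 ≤ (e.length : Int)
  · by_cases htd : (e.length : Int) ≤ e.sum
    · rw [if_pos (show 1 ≤ (e.length : Int) ∧ (e.length : Int) ≤ (e.length : Int) ∧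
            (e.length : Int) ≤ e.sum from ⟨hdim, le_refl _, htd⟩), Int.toNat_natCast]
      by_cases hv : (pvF e e.length e.sum).1 > 0
      · rw [if_pos hv, if_neg (show ¬(e.sum < (e.length : Int) ∨
              (pvF e e.length e.sum).1 ≤ 0) from by rw [not_or]; exact ⟨by omega, by omega⟩)]
        have hw := pv_walk e ht hI e.length e.sum [] (le_refl _) htd (le_refl _)
        rw [sub_self, List.nil_append] at hw
        exact hw
      · rw [if_neg hv, if_pos (show e.sum < (e.length : Int) ∨
              (pvF e e.length e.sum).1 ≤ 0 from Or.inr (by omega))]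
    · rw [if_neg (show ¬(1 ≤ (e.length : Int) ∧ (e.length : Int) ≤ (e.length : Int) ∧
            (e.length : Int) ≤ e.sum) from by rintro ⟨_, _, a⟩; omega)]
      rw [if_neg (show ¬(((0, 0) : Int × Int).1 > 0) from by norm_num)]
      rw [if_pos (show e.sum < (e.length : Int) ∨ (pvF e e.length e.sum).1 ≤ 0 from
        Or.inl (by omega))]
  · rw [if_neg (show ¬(1 ≤ (e.length : Int) ∧ (e.length : Int) ≤ (e.length : Int) ∧
          (e.length : Int) ≤ e.sum) from by rintro ⟨a, _⟩; omega)]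
    rw [if_neg (show ¬(((0, 0) : Int × Int).1 > 0) from by norm_num)]
    have hlen0 : e.length = 0 := by omega
    rw [if_pos (show e.sum < (e.length : Int) ∨ (pvF e e.length e.sum).1 ≤ 0 from
      Or.inr (by rw [hlen0]; exact le_refl 0))]

-- ===== VERDICT (by name: the statement is the Claim_ definition above) =====
theorem winning_die_spec : Claim_equal_winning_die := by
  unfold Claim_equal_winning_die
  intro enemy_die _ hpre
  unfold Spec_winning_die
  exact pv_main enemy_die hpre
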